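-- pv_equiv track=rewrite | github.com/Jah135/pseudoenglish | pseudoenglish/analyze.py | analyze_text_patterns
-- ===== SOURCE A (Python) =====
-- def analyze_text_patterns(input_text: str, pattern_size: int, token_size: int) -> dict[str, dict[str, int]]:
-- 	output_patterns = {}
--
-- 	for index in range(pattern_size, len(input_text) - token_size + 1):
-- 		pattern = input_text[index - pattern_size : index]
-- 		associated_text =input_text[index : index + token_size]
--
-- 		if pattern not in output_patterns:
-- 			output_patterns[pattern] = {}
--
-- 		pattern_dict = output_patterns[pattern]
--
-- 		if associated_text not in pattern_dict:
-- 			pattern_dict[associated_text] = 1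
-- 		else:
-- 			pattern_dict[associated_text] += 1
--
-- 	return output_patterns
-- ===== SOURCE B (Python) =====
-- def analyze_text_patterns(input_text: str, pattern_size: int, token_size: int) -> dict[str, dict[str, int]]:
-- 	# Two-phase: collect all (pattern, token) pairs, then group by pattern
-- 	# (patterns deduplicated in first-occurrence order) and count tokens per group.
-- 	pairs = [(input_text[index - pattern_size : index], input_text[index : index + token_size])
-- 	         for index in range(pattern_size, len(input_text) - token_size + 1)]
-- 	output = {}
-- 	for pattern in dict.fromkeys(p for p, _ in pairs):
-- 		counts = {}
-- 		for token in [t for p, t in pairs if p == pattern]: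
-- 			counts[token] = counts.get(token, 0) + 1
-- 		output[pattern] = counts
-- 	return output
-- ===== Notes on version B (the rewrite author's own statement) =====
-- stated objective: alternative
-- what changed: Replaces A's single-pass incremental nested-dict insertion by a two-phase group-by: collect the (pattern, token) pair list once, deduplicate the patterns in first-occurrence order, and build each inner count dict by a per-pattern counting pass over the pair list.
import Mathlib
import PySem

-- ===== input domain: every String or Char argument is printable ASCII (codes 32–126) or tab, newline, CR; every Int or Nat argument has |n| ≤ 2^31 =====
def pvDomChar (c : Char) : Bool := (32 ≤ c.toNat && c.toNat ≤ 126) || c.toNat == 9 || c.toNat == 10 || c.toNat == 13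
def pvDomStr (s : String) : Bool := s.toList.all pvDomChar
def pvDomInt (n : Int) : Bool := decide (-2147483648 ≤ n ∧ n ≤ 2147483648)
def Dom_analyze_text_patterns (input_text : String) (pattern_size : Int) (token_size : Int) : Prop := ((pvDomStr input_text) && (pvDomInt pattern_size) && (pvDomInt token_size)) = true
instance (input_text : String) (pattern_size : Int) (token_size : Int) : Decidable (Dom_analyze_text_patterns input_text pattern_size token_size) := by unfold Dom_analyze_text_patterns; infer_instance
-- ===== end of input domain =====

-- B replaces A's incremental nested-dict insertion by a two-phase pass: collect all
-- (pattern, token) pairs once, then for each distinct pattern (first-occurrence order)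
-- count its tokens; objective: alternative decomposition, same asymptotic behaviour not claimed faster.

-- ===== PORT A =====
-- loop body of A (the statements inside the for-loop, transliterated)
def aLoopBody (output_patterns : PySem.Dict String (PySem.Dict String Int))
    (pattern associated_text : String) : PySem.Dict String (PySem.Dict String Int) :=
  let output_patterns :=
    if output_patterns.contains pattern = false then
      output_patterns.insert pattern PySem.Dict.empty
    else output_patterns
  let pattern_dict := output_patterns.getD pattern PySem.Dict.empty
  let pattern_dict :=
    if pattern_dict.contains associated_text = false then
      pattern_dict.insert associated_text 1
    else pattern_dict.insert associated_text (pattern_dict.getD associated_text 0 + 1)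
  output_patterns.insert pattern pattern_dict

def analyze_text_patterns (input_text : String) (pattern_size : Int) (token_size : Int) : List (String × List (String × Int)) :=
  let output_patterns :=
    (PySem.List.pyRange pattern_size (PySem.Str.len input_text - token_size + 1) 1).foldl
      (fun output_patterns index =>
        aLoopBody output_patterns
          (PySem.Str.slice input_text (some (index - pattern_size)) (some index))
          (PySem.Str.slice input_text (some index) (some (index + token_size))))
      PySem.Dict.empty
  output_patterns.items.map (fun q => (q.1, q.2.items))

-- ===== PORT B =====
def analyze_text_patterns_alt (input_text : String) (pattern_size : Int) (token_size : Int) : List (String × List (String × Int)) :=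
  let pairs :=
    (PySem.List.pyRange pattern_size (PySem.Str.len input_text - token_size + 1) 1).map
      (fun index =>
        (PySem.Str.slice input_text (some (index - pattern_size)) (some index),
         PySem.Str.slice input_text (some index) (some (index + token_size))))
  let output :=
    (PySem.List.dedup (pairs.map (·.1))).foldl
      (fun output pattern =>
        let toks := (pairs.filter (fun q => q.1 == pattern)).map (·.2)
        let counts := toks.foldl
          (fun counts token => counts.insert token (counts.getD token 0 + 1)) PySem.Dict.empty
        output.insert pattern counts)
      PySem.Dict.empty
  output.items.map (fun q => (q.1, q.2.items))

-- ===== PRECONDITION & SPEC =====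
def Spec_analyze_text_patterns (input_text : String) (pattern_size : Int) (token_size : Int) (out : List (String × List (String × Int))) : Prop := out = analyze_text_patterns_alt input_text pattern_size token_size
instance (input_text : String) (pattern_size : Int) (token_size : Int) (out : List (String × List (String × Int))) : Decidable (Spec_analyze_text_patterns input_text pattern_size token_size out) := by unfold Spec_analyze_text_patterns; infer_instance

-- ===== CLAIM (what is proved, stated in full; the proofs are below) =====
def Claim_equal_analyze_text_patterns : Prop := ∀ (input_text : String) (pattern_size : Int) (token_size : Int), Dom_analyze_text_patterns input_text pattern_size token_size → Spec_analyze_text_patterns input_text pattern_size token_size (analyze_text_patterns input_text pattern_size token_size)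

-- ===== LEMMAS AND PROOFS =====

-- A's loop body, simplified: both branches are one overwrite-in-place insert.
theorem aLoopBody_eq (d : PySem.Dict String (PySem.Dict String Int)) (p t : String) :
    aLoopBody d p t =
      d.insert p ((d.getD p PySem.Dict.empty).insert t
        ((d.getD p PySem.Dict.empty).getD t 0 + 1)) := by
  unfold aLoopBody
  by_cases hp : d.contains p = false
  · simp only [hp, if_true, PySem.Dict.getD_insert_self, PySem.Dict.insert_insert_self,
      PySem.Dict.getD_of_not_contains _ _ hp]
    simp [PySem.Dict.contains_empty, PySem.Dict.getD_empty]
  · simp only [hp]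
    by_cases ht : (d.getD p PySem.Dict.empty).contains t = false
    · simp [ht, PySem.Dict.getD_of_not_contains _ _ ht]
    · simp [ht]

-- value at key c after A's whole loop: the inner counting fold over the tokens
-- of exactly the pairs whose pattern is c
theorem foldA_getD (ps : List (String × String))
    (d : PySem.Dict String (PySem.Dict String Int)) (c : String) :
    (ps.foldl (fun d x => d.insert x.1 ((d.getD x.1 PySem.Dict.empty).insert x.2
        ((d.getD x.1 PySem.Dict.empty).getD x.2 0 + 1))) d).getD c PySem.Dict.empty
      = ((ps.filter (fun q => q.1 == c)).map (fun x => x.2)).foldl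
          (fun m t => m.insert t (m.getD t 0 + 1)) (d.getD c PySem.Dict.empty) := by
  induction ps generalizing d with
  | nil => rfl
  | cons x ps ih =>
    simp only [List.foldl_cons, List.filter_cons]
    by_cases h : x.1 = c
    · subst h
      simp only [beq_self_eq_true, if_true, List.map_cons, List.foldl_cons, ih,
        PySem.Dict.getD_insert_self]
    · have hb : (x.1 == c) = false := by simp [h]
      rw [hb]
      simp only [Bool.false_eq_true, if_false, ih,
        PySem.Dict.getD_insert_of_ne _ _ _ (Ne.symm h)]

-- the whole equivalence, over an arbitrary index list and slice functions
theorem items_eq (l : List Int) (pat tok : Int → String) :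
    (l.foldl (fun (d : PySem.Dict String (PySem.Dict String Int)) i => d.insert (pat i) ((d.getD (pat i) PySem.Dict.empty).insert (tok i)
        ((d.getD (pat i) PySem.Dict.empty).getD (tok i) 0 + 1))) PySem.Dict.empty).items
      = ((PySem.List.dedup ((l.map (fun i => (pat i, tok i))).map (fun x => x.1))).foldl
          (fun out p => out.insert p
            (((((l.map (fun i => (pat i, tok i))).filter (fun q => q.1 == p)).map (fun x => x.2)).foldl
              (fun m t => m.insert t (m.getD t 0 + 1)) PySem.Dict.empty)))
          PySem.Dict.empty).items := by
  set ps := l.map (fun i => (pat i, tok i)) with hps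
  have hA : (l.foldl (fun (d : PySem.Dict String (PySem.Dict String Int)) i => d.insert (pat i) ((d.getD (pat i) PySem.Dict.empty).insert (tok i)
        ((d.getD (pat i) PySem.Dict.empty).getD (tok i) 0 + 1))) PySem.Dict.empty)
      = (ps.foldl (fun d x => d.insert x.1 ((d.getD x.1 PySem.Dict.empty).insert x.2
        ((d.getD x.1 PySem.Dict.empty).getD x.2 0 + 1))) PySem.Dict.empty) := by
    rw [hps, List.foldl_map]
  rw [hA]
  have hnd : (ps.foldl (fun (d : PySem.Dict String (PySem.Dict String Int)) x => d.insert x.1 ((d.getD x.1 PySem.Dict.empty).insert x.2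
        ((d.getD x.1 PySem.Dict.empty).getD x.2 0 + 1))) PySem.Dict.empty).keys.Nodup :=
    PySem.Dict.nodup_keys_foldl_insert_key ps (fun x => x.1) _ _ PySem.Dict.nodup_keys_empty
  have hkeys : (ps.foldl (fun (d : PySem.Dict String (PySem.Dict String Int)) x => d.insert x.1 ((d.getD x.1 PySem.Dict.empty).insert x.2
        ((d.getD x.1 PySem.Dict.empty).getD x.2 0 + 1))) PySem.Dict.empty).keys
      = PySem.List.dedup (ps.map (fun x => x.1)) := by
    rw [PySem.Dict.keys_foldl_insert_key ps (fun x => x.1) _ _, PySem.Dict.keys_empty,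
      PySem.Set.update_nil_left, PySem.List.dedup_eq_ofList]
  refine Eq.trans (PySem.Dict.items_eq_map_keys _ hnd PySem.Dict.empty) ?_
  rw [hkeys]
  have hfresh := PySem.Dict.items_foldl_insert_fresh (PySem.List.dedup (ps.map (fun x => x.1)))
      (fun p => p)
      (fun p => (((ps.filter (fun q => q.1 == p)).map (fun x => x.2)).foldl
        (fun m t => m.insert t (m.getD t 0 + 1)) (PySem.Dict.empty : PySem.Dict String Int)))
      PySem.Dict.empty
      (fun a _ => PySem.Dict.contains_empty a)
      (by simpa using PySem.List.nodup_dedup (ps.map (fun x => x.1)))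
  rw [hfresh]
  rw [show (PySem.Dict.empty : PySem.Dict String (PySem.Dict String Int)).items = [] from rfl,
    List.nil_append]
  refine List.map_congr_left (fun p _ => ?_)
  rw [foldA_getD ps PySem.Dict.empty p, PySem.Dict.getD_empty]

-- ===== VERDICT (by name: the statement is the Claim_ definition above) =====
theorem analyze_text_patterns_spec : Claim_equal_analyze_text_patterns := by
  intro input_text pattern_size token_size _
  unfold Spec_analyze_text_patterns analyze_text_patterns analyze_text_patterns_alt
  simp only [aLoopBody_eq]
  exact congrArg (List.map (fun q => (q.1, q.2.items)))
    (items_eq (PySem.List.pyRange pattern_size (PySem.Str.len input_text - token_size + 1) 1)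
      (fun index => PySem.Str.slice input_text (some (index - pattern_size)) (some index))
      (fun index => PySem.Str.slice input_text (some index) (some (index + token_size))))
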